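-- pv_equiv track=rewrite | github.com/jasonzhang1998/LC | Job/interview/2022_2_21_ms.py | deleteCharacter
-- ===== SOURCE A (Python) =====
-- import collections
--
-- def deleteCharacter(s):
--     n = len(s)
--     start, end = 0, 0
--     pos = {}
--     level = 0
--     for i in range(n):
--         if s[i] == '<':
--             if level == 0:
--                 start = i
--             level += 1
--         if s[i] == '>':
--             if level == 1:
--                 end = i
--                 pos[start] = end
--             level -= 1
--     new_s = ''
--     start = 0
--     for k, v in pos.items():
--         new_s += s[start:k]
--         start = v + 1
--     new_s += s[start:]
--
--     dic = collections.Counter(new_s)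
--     minCount = len(s)
--     chars = []
--     for v in dic.values():
--         if v < minCount:
--             minCount = v
--     for k, v in dic.items():
--         if v == minCount:
--             chars.append(k)
--     for ch in chars:
--         strs = new_s.split(ch)
--         new_s = ''
--         for item in strs:
--             new_s += item
--     return new_s
-- ===== SOURCE B (Python) =====
-- import collections
--
-- def deleteCharacter(s):
--     # single emit pass: buffer a pending top-level <...> segment, discard it
--     # when closed, flush it if left unclosed at the end
--     out = []
--     buf = []
--     level = 0
--     for ch in s:
--         if ch == '<':
--             if level == 0:
--                 buf = [ch]
--             elif level > 0:
--                 buf.append(ch)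
--             else:
--                 out.append(ch)
--             level += 1
--         elif ch == '>':
--             level -= 1
--             if level == 0:
--                 buf = []
--             elif level > 0:
--                 buf.append(ch)
--             else:
--                 out.append(ch)
--         else:
--             (buf if level > 0 else out).append(ch)
--     t = out + buf
--     if not t:
--         return ''
--     cnt = collections.Counter(t)
--     m = min(cnt.values())
--     return ''.join(c for c in t if cnt[c] != m)
-- ===== Notes on version B (the rewrite author's own statement) =====
-- stated objective: alternative
-- what changed: Phase 1's build-pos-dictionary-then-reconstruct-by-slices two-pass is replaced by a single emit pass with a pending-segment buffer (flushed if the segment is left unclosed), and phase 2's sequential split/reconcatenate removal loops are replaced by one filter against the minimum count.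
import Mathlib
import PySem

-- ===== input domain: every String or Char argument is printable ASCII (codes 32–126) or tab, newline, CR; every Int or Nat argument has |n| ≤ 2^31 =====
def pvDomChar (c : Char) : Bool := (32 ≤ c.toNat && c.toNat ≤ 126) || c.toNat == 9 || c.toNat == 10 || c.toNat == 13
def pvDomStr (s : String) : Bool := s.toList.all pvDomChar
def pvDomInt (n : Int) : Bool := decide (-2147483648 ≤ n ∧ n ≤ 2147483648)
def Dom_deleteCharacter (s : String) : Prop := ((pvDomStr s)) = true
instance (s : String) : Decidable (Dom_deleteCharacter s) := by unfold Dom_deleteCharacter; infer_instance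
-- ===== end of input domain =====

-- B replaces A's two-pass phase 1 (index dictionary + slice reconstruction) by a single
-- emit pass with a pending buffer, and its sequential split/rebuild removal by one filter;
-- same return value (alternative decomposition, no asymptotic change).

-- ===== PORT A =====

-- the scan loop: for i in range(n), state (start, end, pos, level)
def aLoop : List Char → Int → Int × Int × PySem.Dict Int Int × Int → Int × Int × PySem.Dict Int Int × Int
  | [], _, st => st
  | c :: rest, i, (start, end_, pos, level) =>
    let (start, level) := if c = '<' then ((if level = 0 then i else start), level + 1) else (start, level)
    let (end_, pos, level) :=
      if c = '>' then
        (if level = 1 then ((i : Int), pos.insert start i, level - 1) else (end_, pos, level - 1))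
      else (end_, pos, level)
    aLoop rest (i + 1) (start, end_, pos, level)

def deleteCharacter (s : String) : String :=
  let cs := s.toList
  let n := cs.length
  let (_start, _end, pos, _level) := aLoop cs 0 (0, 0, PySem.Dict.empty, 0)
  -- reconstruction: new_s += s[start:k]; start = v + 1
  let (new_s, start) := pos.items.foldl
      (fun (p : List Char × Int) kv => (p.1 ++ PySem.List.slice cs (some p.2) (some kv.1), kv.2 + 1))
      (([] : List Char), (0 : Int))
  let new_s := new_s ++ PySem.List.slice cs (some start) none
  let dic := PySem.Dict.counter new_s
  let minCount := dic.values.foldl (fun m v => if v < m then v else m) (n : Int)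
  let chars := dic.items.foldl (fun acc kv => if kv.2 = minCount then acc ++ [kv.1] else acc) ([] : List Char)
  let new_s := chars.foldl
      (fun ns ch => (PySem.Chars.splitOn ns [ch]).foldl (fun acc item => acc ++ item) [])
      new_s
  String.mk new_s

-- ===== PORT B =====

-- single emit pass: out = kept characters, buf = pending (possibly unclosed) top-level segment
def bLoop : List Char → List Char × List Char × Int → List Char × List Char × Int
  | [], st => st
  | c :: rest, (out, buf, level) =>
    if c = '<' then
      let (out, buf) := if level = 0 then (out, [c]) else if 0 < level then (out, buf ++ [c]) else (out ++ [c], buf)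
      bLoop rest (out, buf, level + 1)
    else if c = '>' then
      let level := level - 1
      let (out, buf) := if level = 0 then (out, ([] : List Char)) else if 0 < level then (out, buf ++ [c]) else (out ++ [c], buf)
      bLoop rest (out, buf, level)
    else
      bLoop rest (if 0 < level then (out, buf ++ [c], level) else (out ++ [c], buf, level))

def deleteCharacter_alt (s : String) : String :=
  let (out, buf, _) := bLoop s.toList ([], [], 0)
  let t := out ++ buf
  if t = [] then "" else
    let cnt := PySem.Dict.counter t
    let m := PySem.List.minD cnt.values id 0
    String.mk (t.filter (fun c => cnt.getD c 0 ≠ m))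

-- ===== PRECONDITION & SPEC =====
def Spec_deleteCharacter (s : String) (out : String) : Prop := out = deleteCharacter_alt s
instance (s : String) (out : String) : Decidable (Spec_deleteCharacter s out) := by unfold Spec_deleteCharacter; infer_instance

-- ===== CLAIM (what is proved, stated in full; the proofs are below) =====
def Claim_equal_deleteCharacter : Prop := ∀ (s : String), Dom_deleteCharacter s → Spec_deleteCharacter s (deleteCharacter s)

-- ===== LEMMAS AND PROOFS =====

def reconAcc (cs : List Char) (l : List (Int × Int)) : List Char × Int :=
  l.foldl (fun (p : List Char × Int) kv => (p.1 ++ PySem.List.slice cs (some p.2) (some kv.1), kv.2 + 1))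
    (([] : List Char), (0 : Int))

theorem take_succ_drop (cs : List Char) (st i : Nat) (hst : st ≤ i) (hi : i < cs.length) :
    (cs.take (i + 1)).drop st = (cs.take i).drop st ++ [cs[i]] := by
  rw [List.take_add_one, List.getElem?_eq_getElem hi, Option.toList_some,
    List.drop_append_of_le_length (by simp; omega)]

theorem slice_eq_take_drop (cs : List Char) (a b : Int) (ha : 0 ≤ a) (hb : 0 ≤ b) :
    PySem.List.slice cs (some a) (some b) = (cs.take b.toNat).drop a.toNat := by
  rw [PySem.List.slice_toNat cs ha hb, List.drop_take]

theorem phase1 : ∀ (rest cs : List Char) (i : Nat) (st en lv : Int) (pos : PySem.Dict Int Int)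
    (out buf : List Char),
    cs.drop i = rest → i ≤ cs.length →
    0 ≤ (reconAcc cs pos.items).2 → (reconAcc cs pos.items).2.toNat ≤ i →
    (∀ p ∈ pos.items, p.1 < (reconAcc cs pos.items).2) →
    (if 0 < lv then
        (reconAcc cs pos.items).2 ≤ st ∧ 0 ≤ st ∧ st.toNat ≤ i ∧
        out = (reconAcc cs pos.items).1 ++ (cs.take st.toNat).drop (reconAcc cs pos.items).2.toNat ∧
        buf = (cs.take i).drop st.toNat
      else
        out = (reconAcc cs pos.items).1 ++ (cs.take i).drop (reconAcc cs pos.items).2.toNat ∧ buf = []) →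
    (reconAcc cs (aLoop rest i (st, en, pos, lv)).2.2.1.items).1 ++
      PySem.List.slice cs (some (reconAcc cs (aLoop rest i (st, en, pos, lv)).2.2.1.items).2) none =
    (bLoop rest (out, buf, lv)).1 ++ (bLoop rest (out, buf, lv)).2.1 := by
  intro rest cs
  induction rest with
  | nil =>
    intro i st en lv pos out buf hdrop hle h0 hptr hkeys hinv
    have hlen : i = cs.length := by
      have := List.drop_eq_nil_iff.mp hdrop; omega
    subst hlen
    simp only [aLoop, bLoop]
    rw [PySem.List.slice_from cs h0]
    split at hinv
    · obtain ⟨hps, hs0, hsi, hout, hbuf⟩ := hinv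
      rw [hout, hbuf, List.take_length]
      conv_lhs => rw [← List.take_append_drop st.toNat cs]
      rw [List.drop_append_of_le_length (by simp; omega)]
      simp
    · obtain ⟨hout, hbuf⟩ := hinv
      rw [hout, hbuf, List.take_length, List.append_nil]
  | cons c rest' ih =>
    intro i st en lv pos out buf hdrop hle h0 hptr hkeys hinv
    have hi : i < cs.length := by
      have := congrArg List.length hdrop; simp at this; omega
    have hc : cs[i] = c := by
      have h0' : (cs.drop i)[0]'(by simp [hdrop]) = c := by simp [hdrop]
      rw [List.getElem_drop] at h0'; simpa using h0'
    have hrest' : cs.drop (i + 1) = rest' := by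
      have h2 : cs.drop (i + 1) = List.drop 1 (c :: rest') := by rw [← hdrop, List.drop_drop]
      simpa using h2
    by_cases h1 : c = '<'
    · subst h1
      rcases lt_trichotomy lv 0 with hlv | hlv | hlv
      · -- lv < 0 : out gets the char
        simp only [aLoop, bLoop, if_pos rfl, if_neg (by decide : ¬ ('<' = '>')),
          if_neg (by omega : ¬ lv = 0), if_neg (not_lt.mpr (le_of_lt hlv))]
        rw [if_neg (by omega : ¬ (0:Int) < lv)] at hinv
        obtain ⟨hout, hbuf⟩ := hinv
        have := ih (i + 1) st en (lv + 1) pos (out ++ ['<']) buf hrest' (by omega) h0 (by omega) hkeys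
          (by rw [if_neg (by omega : ¬ (0 : Int) < lv + 1)]
              constructor
              · rw [hout, take_succ_drop cs _ i (by omega) hi, hc]; simp
              · exact hbuf)
        simpa using this
      · -- lv = 0 : open a segment
        subst hlv
        simp only [aLoop, bLoop, if_pos rfl, if_neg (by decide : ¬ ('<' = '>'))]
        rw [if_neg (by omega)] at hinv
        obtain ⟨hout, hbuf⟩ := hinv
        have := ih (i + 1) (i : Int) en 1 pos out ['<'] hrest' (by omega) h0 (by omega) hkeys
          (by rw [if_pos (by omega : (0:Int) < 1)]; simp only [Int.toNat_natCast]
              refine ⟨by omega, by omega, by simp, by simpa using hout, ?_⟩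
              rw [take_succ_drop cs i i (le_refl i) hi, hc]
              simp)
        simpa using this
      · -- 0 < lv : buffered
        simp only [aLoop, bLoop, if_pos rfl, if_neg (by decide : ¬ ('<' = '>')),
          if_neg (by omega : ¬ lv = 0), if_pos hlv]
        rw [if_pos hlv] at hinv
        obtain ⟨hps, hs0, hsi, hout, hbuf⟩ := hinv
        have := ih (i + 1) st en (lv + 1) pos out (buf ++ ['<']) hrest' (by omega) h0 (by omega) hkeys
          (by rw [if_pos (by omega : (0:Int) < lv + 1)]
              refine ⟨hps, hs0, by omega, hout, ?_⟩
              rw [hbuf, take_succ_drop cs _ i hsi hi, hc])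
        simpa using this
    · by_cases h2 : c = '>'
      · subst h2
        rcases lt_trichotomy lv 1 with hlv | hlv | hlv
        · -- lv ≤ 0 : out gets the char
          have hlv0 : lv ≤ 0 := by omega
          simp only [aLoop, bLoop, if_neg h1, if_pos rfl, if_neg (by omega : ¬ lv = 1),
            if_neg (by omega : ¬ lv - 1 = 0), if_neg (by omega : ¬ (0:Int) < lv - 1)]
          rw [if_neg (by omega : ¬ (0:Int) < lv)] at hinv
          obtain ⟨hout, hbuf⟩ := hinv
          have := ih (i + 1) st en (lv - 1) pos (out ++ ['>']) buf hrest' (by omega) h0 (by omega) hkeys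
            (by rw [if_neg (by omega : ¬ (0:Int) < lv - 1)]
                constructor
                · rw [hout, take_succ_drop cs _ i (by omega) hi, hc]; simp
                · exact hbuf)
          simpa using this
        · -- lv = 1 : close the segment, record it in pos / discard buf
          subst hlv
          simp only [aLoop, bLoop, if_neg h1, if_pos rfl, if_pos (rfl : (1:Int) = 1),
            if_pos (by omega : (1:Int) - 1 = 0)]
          rw [if_pos (by omega : (0:Int) < 1)] at hinv
          obtain ⟨hps, hs0, hsi, hout, hbuf⟩ := hinv
          have hnc : pos.contains st = false := by
            rw [PySem.Dict.contains_eq_decide_mem_keys]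
            simp only [PySem.Dict.keys, decide_eq_false_iff_not, List.mem_map]
            rintro ⟨p, hp, hpk⟩
            have := hkeys p hp; omega
          have hitems : (pos.insert st (i : Int)).items = pos.items ++ [(st, (i : Int))] :=
            PySem.Dict.items_insert_of_not_contains _ _ hnc
          have hrc : reconAcc cs (pos.items ++ [(st, (i : Int))]) =
              ((reconAcc cs pos.items).1 ++ PySem.List.slice cs (some (reconAcc cs pos.items).2) (some st),
               (i : Int) + 1) := by
            simp [reconAcc, List.foldl_append]
          have := ih (i + 1) st (i : Int) 0 (pos.insert st (i : Int)) out [] hrest' (by omega)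
            (by rw [hitems, hrc]; omega)
            (by rw [hitems, hrc]; simp)
            (by rw [hitems, hrc]
                intro p hp
                rcases List.mem_append.mp hp with hp' | hp'
                · have := hkeys p hp'; omega
                · simp at hp'; subst hp'; simp; omega)
            (by rw [if_neg (by omega : ¬ (0:Int) < 0), hitems, hrc]
                refine ⟨?_, rfl⟩
                rw [hout, slice_eq_take_drop cs _ _ h0 hs0]
                simp [List.drop_take])
          simpa using this
        · -- lv > 1 : buffered
          simp only [aLoop, bLoop, if_neg h1, if_pos rfl, if_neg (by omega : ¬ lv = 1),
            if_neg (by omega : ¬ lv - 1 = 0), if_pos (by omega : (0:Int) < lv - 1)]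
          rw [if_pos (by omega : (0:Int) < lv)] at hinv
          obtain ⟨hps, hs0, hsi, hout, hbuf⟩ := hinv
          have := ih (i + 1) st en (lv - 1) pos out (buf ++ ['>']) hrest' (by omega) h0 (by omega) hkeys
            (by rw [if_pos (by omega : (0:Int) < lv - 1)]
                refine ⟨hps, hs0, by omega, hout, ?_⟩
                rw [hbuf, take_succ_drop cs _ i hsi hi, hc])
          simpa using this
      · -- ordinary character
        by_cases hlv : (0:Int) < lv
        · simp only [aLoop, bLoop, if_neg h1, if_neg h2, if_pos hlv]
          rw [if_pos hlv] at hinv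
          obtain ⟨hps, hs0, hsi, hout, hbuf⟩ := hinv
          have := ih (i + 1) st en lv pos out (buf ++ [c]) hrest' (by omega) h0 (by omega) hkeys
            (by rw [if_pos hlv]
                refine ⟨hps, hs0, by omega, hout, ?_⟩
                rw [hbuf, take_succ_drop cs _ i hsi hi, hc])
          simpa using this
        · simp only [aLoop, bLoop, if_neg h1, if_neg h2, if_neg hlv]
          rw [if_neg hlv] at hinv
          obtain ⟨hout, hbuf⟩ := hinv
          have := ih (i + 1) st en lv pos (out ++ [c]) buf hrest' (by omega) h0 (by omega) hkeys
            (by rw [if_neg hlv]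
                constructor
                · rw [hout, take_succ_drop cs _ i (by omega) hi, hc]; simp
                · exact hbuf)
          simpa using this


theorem min?_cons_eq : ∀ (xs : List Int) (m : Int),
    PySem.List.min? (m :: xs) id = some (xs.foldl (fun m v => if v < m then v else m) m) := by
  intro xs
  induction xs with
  | nil => intro m; rfl
  | cons x xs ih =>
    intro m
    have h : PySem.List.min? (m :: x :: xs) id = PySem.List.min? ((if x < m then x else m) :: xs) id := by
      simp only [PySem.List.min?, List.foldl_cons]
      congr 1
      simp only [id]
      split <;> rfl
    rw [h, ih, List.foldl_cons]

theorem minfold (l : List Int) (N : Int) (hne : l ≠ []) (hb : ∀ v ∈ l, v ≤ N) :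
    l.foldl (fun m v => if v < m then v else m) N = PySem.List.minD l id 0 := by
  match l with
  | x :: xs =>
    have hx : (if x < N then x else N) = x := by
      have := hb x (by simp); split <;> omega
    rw [PySem.List.minD, min?_cons_eq, Option.getD_some, List.foldl_cons, hx]

theorem splitOn_go_flatten (c : Char) : ∀ (fuel : Nat) (l cur : List Char) (acc : List (List Char)),
    l.length ≤ fuel →
    (PySem.Chars.splitOn.go [c] fuel l cur acc).foldl (fun a b => a ++ b) [] =
      (acc.reverse.foldl (fun a b => a ++ b) []) ++ cur.reverse ++ l.filter (fun x => x ≠ c) := by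
  intro fuel
  induction fuel with
  | zero => intro l cur acc h
            have : l = [] := List.eq_nil_of_length_eq_zero (Nat.le_zero.mp h)
            subst this
            simp [PySem.Chars.splitOn.go]
  | succ n ih =>
    intro l cur acc h
    match l with
    | [] => simp [PySem.Chars.splitOn.go]
    | x :: rest =>
      rw [PySem.Chars.splitOn.go]
      by_cases hx : x = c
      · subst hx
        have hp : List.isPrefixOf [x] (x :: rest) = true := by simp [List.isPrefixOf]
        rw [if_pos hp]
        rw [ih _ _ _ (by simpa using Nat.le_of_succ_le_succ h)]
        simp
      · have hp : ¬ (List.isPrefixOf [c] (x :: rest) = true) := by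
          simp [List.isPrefixOf]; exact fun h => hx h.symm
        rw [if_neg hp]
        rw [ih _ _ _ (by simpa using Nat.le_of_succ_le_succ h)]
        simp [hx]

theorem remove_one (t : List Char) (c : Char) :
    (PySem.Chars.splitOn t [c]).foldl (fun a b => a ++ b) [] = t.filter (fun x => x ≠ c) := by
  rw [PySem.Chars.splitOn, splitOn_go_flatten c (t.length + 1) t [] [] (by omega)]
  simp

theorem remove_all : ∀ (chars : List Char) (t : List Char),
    chars.foldl (fun ns ch => (PySem.Chars.splitOn ns [ch]).foldl (fun a b => a ++ b) []) t =
      t.filter (fun x => decide (x ∉ chars)) := by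
  intro chars
  induction chars with
  | nil => simp
  | cons c rest ih =>
    intro t
    rw [List.foldl_cons, remove_one, ih, List.filter_filter]
    apply List.filter_congr
    intro x _
    by_cases hx : x = c <;> simp [hx]

theorem phase2 (n : Nat) (t : List Char) (hlen : t.length ≤ n) :
    (let dic := PySem.Dict.counter t
     let minCount := dic.values.foldl (fun m v => if v < m then v else m) ((n : Nat) : Int)
     let chars := dic.items.foldl (fun acc kv => if kv.2 = minCount then acc ++ [kv.1] else acc) ([] : List Char)
     String.mk (chars.foldl (fun ns ch => (PySem.Chars.splitOn ns [ch]).foldl (fun a b => a ++ b) []) t))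
    = (if t = [] then "" else
       String.mk (t.filter (fun c => PySem.Dict.getD (PySem.Dict.counter t) c 0 ≠ PySem.List.minD (PySem.Dict.counter t).values id 0))) := by
  by_cases hne : t = []
  · subst hne; rfl
  · rw [if_neg hne]
    simp only []
    have hvals : (PySem.Dict.counter t).values = (PySem.Set.ofList t).map (fun k => (List.count k t : Int)) := by
      simp only [PySem.Dict.values, PySem.Dict.items_counter, List.map_map]
      rfl
    have hsetne : PySem.Set.ofList t ≠ [] := by
      intro hset
      match t, hne with
      | x :: ts, _ =>
        have : x ∈ PySem.Set.ofList (x :: ts) := (PySem.Set.mem_ofList _ _).mpr (by simp)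
        rw [hset] at this
        exact absurd this (List.not_mem_nil)
    have hvne : (PySem.Dict.counter t).values ≠ [] := by
      rw [hvals]; intro h; exact hsetne (List.map_eq_nil_iff.mp h)
    have hmin : (PySem.Dict.counter t).values.foldl (fun m v => if v < m then v else m) ((n : Nat) : Int)
        = PySem.List.minD (PySem.Dict.counter t).values id 0 := by
      apply minfold _ _ hvne
      intro v hv
      rw [hvals] at hv
      obtain ⟨k, _, rfl⟩ := List.mem_map.mp hv
      have : List.count k t ≤ t.length := List.count_le_length
      omega
    rw [hmin]
    set m := PySem.List.minD (PySem.Dict.counter t).values id 0 with hm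
    rw [PySem.List.foldl_append_ite (p := fun kv : Char × Int => kv.2 = m)
          (f := fun kv : Char × Int => kv.1), List.nil_append]
    rw [remove_all]
    congr 1
    apply List.filter_congr
    intro x hx
    have hcnt : PySem.Dict.getD (PySem.Dict.counter t) x 0 = (List.count x t : Int) :=
      PySem.Dict.getD_counter t x
    have hmem : x ∈ (((PySem.Dict.counter t).items.filter (fun kv => decide (kv.2 = m))).map
        (fun kv : Char × Int => kv.1)) ↔ (List.count x t : Int) = m := by
      rw [PySem.Dict.items_counter]
      simp only [List.filter_map, List.map_map, List.mem_map, List.mem_filter,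
        Function.comp]
      constructor
      · rintro ⟨k, ⟨hk1, hk2⟩, rfl⟩
        simpa using hk2
      · intro hcm
        exact ⟨x, ⟨(PySem.Set.mem_ofList _ _).mpr hx, by simpa using hcm⟩, rfl⟩
    by_cases hc : (List.count x t : Int) = m
    · simp [hcnt, hc, hmem.mpr hc]
    · have : x ∉ _ := fun hmm => hc (hmem.mp hmm)
      simp [hcnt, hc, this]

theorem bLoop_len : ∀ (rest out buf : List Char) (lv : Int), (¬ 0 < lv → buf = []) →
    (bLoop rest (out, buf, lv)).1.length + (bLoop rest (out, buf, lv)).2.1.length ≤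
      out.length + buf.length + rest.length := by
  intro rest
  induction rest with
  | nil => intro out buf lv _; simp [bLoop]
  | cons c rest' ih =>
    intro out buf lv hb
    by_cases h1 : c = '<'
    · subst h1
      simp only [bLoop, if_pos rfl]
      rcases lt_trichotomy lv 0 with hlv | hlv | hlv
      · rw [if_neg (by omega : ¬ lv = 0), if_neg (by omega : ¬ (0:Int) < lv)]
        have := ih (out ++ ['<']) buf (lv + 1) (fun _ => hb (by omega))
        simp at this ⊢; omega
      · subst hlv
        rw [if_pos rfl]
        have hbe := hb (by omega)
        have := ih out ['<'] 1 (by omega)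
        simp [hbe] at this ⊢; omega
      · rw [if_neg (by omega : ¬ lv = 0), if_pos hlv]
        have := ih out (buf ++ ['<']) (lv + 1) (by omega)
        simp at this ⊢; omega
    · by_cases h2 : c = '>'
      · subst h2
        simp only [bLoop, if_neg h1, if_pos rfl]
        rcases lt_trichotomy lv 1 with hlv | hlv | hlv
        · rw [if_neg (by omega : ¬ lv - 1 = 0), if_neg (by omega : ¬ (0:Int) < lv - 1)]
          have hbe := hb (by omega)
          have := ih (out ++ ['>']) buf (lv - 1) (fun _ => hbe)
          simp [hbe] at this ⊢; omega
        · subst hlv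
          rw [if_pos (by omega : (1:Int) - 1 = 0)]
          have := ih out [] 0 (fun _ => rfl)
          simp at this ⊢; omega
        · rw [if_neg (by omega : ¬ lv - 1 = 0), if_pos (by omega : (0:Int) < lv - 1)]
          have := ih out (buf ++ ['>']) (lv - 1) (by omega)
          simp at this ⊢; omega
      · simp only [bLoop, if_neg h1, if_neg h2]
        by_cases hlv : (0:Int) < lv
        · rw [if_pos hlv]
          have := ih out (buf ++ [c]) lv (by omega)
          simp at this ⊢; omega
        · rw [if_neg hlv]
          have := ih (out ++ [c]) buf lv (fun _ => hb hlv)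
          simp at this ⊢; omega

-- ===== VERDICT (by name: the statement is the Claim_ definition above) =====
theorem reconAcc_eq (cs : List Char) (l : List (Int × Int)) :
    List.foldl (fun (p : List Char × Int) kv =>
        (p.1 ++ PySem.List.slice cs (some p.2) (some kv.1), kv.2 + 1)) (([] : List Char), (0 : Int)) l
      = reconAcc cs l := rfl

theorem deleteCharacter_spec : Claim_equal_deleteCharacter := by
  intro s _
  show deleteCharacter s = deleteCharacter_alt s
  unfold deleteCharacter deleteCharacter_alt
  have hph1 := phase1 s.toList s.toList 0 0 0 0 PySem.Dict.empty [] []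
    (by simp) (by simp)
    (by simp [reconAcc, PySem.Dict.empty, PySem.Dict.items])
    (by simp [reconAcc, PySem.Dict.empty, PySem.Dict.items])
    (by simp [reconAcc, PySem.Dict.empty, PySem.Dict.items])
    (by rw [if_neg (by omega : ¬ (0:Int) < 0)]
        simp [reconAcc, PySem.Dict.empty, PySem.Dict.items])
  simp only [Nat.cast_zero] at hph1
  simp only [reconAcc_eq]
  simp only [hph1]
  rcases hbL : bLoop s.toList ([], [], 0) with ⟨out, buf, lv2⟩
  have hlenb := bLoop_len s.toList [] [] 0 (fun _ => rfl)
  rw [hbL] at hlenb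
  simp only [List.length_nil] at hlenb
  have := phase2 s.toList.length (out ++ buf) (by simp at hlenb ⊢; omega)
  simpa using this
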